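-- pv_equiv track=rewrite | github.com/loveencounterflow/hengist | dev/snippets/wordwrap_with_dynamic_programming.py | lines_from_line_breaks
-- ===== SOURCE A (Python) =====
-- def lines_from_line_breaks( words, line_breaks ):
--   R         = []
--   last_idx  = len( words )
--   idxs      = list( i - 1 for i in line_breaks )
--   while True:
--     if last_idx < 1: break
--     first_idx = idxs[ last_idx ]
--     line      = words[ first_idx : last_idx ]
--     last_idx  = first_idx
--     R.append( line )
--   R.reverse()
--   return R
-- ===== SOURCE B (Python) =====
-- def lines_from_line_breaks(words, line_breaks):
--     starts = set()
--     cur = len(words)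
--     while cur >= 1:
--         cur = line_breaks[cur] - 1
--         starts.add(cur)
--     R = []
--     line = []
--     for k, w in enumerate(words):
--         if k in starts and k > 0:
--             R.append(line)
--             line = []
--         line.append(w)
--     if words:
--         R.append(line)
--     return R
-- ===== Notes on version B (the rewrite author's own statement) =====
-- stated objective: alternative
-- what changed: A walks the break pointers backwards, slicing each whole line out of words inside the loop, appending it and reversing the collected list at the end; B records the reached line-start indices in a hash set during one pointer chase and then makes a single forward pass over the words, starting a fresh accumulator line whenever the index is a recorded start - no slicing and no reversal.
-- outside the precondition, e.g. on lines_from_line_breaks(['a', 'b'], [0, 9, 0]): A returns [['b']], B returns [['a', 'b']]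
import Mathlib
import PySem

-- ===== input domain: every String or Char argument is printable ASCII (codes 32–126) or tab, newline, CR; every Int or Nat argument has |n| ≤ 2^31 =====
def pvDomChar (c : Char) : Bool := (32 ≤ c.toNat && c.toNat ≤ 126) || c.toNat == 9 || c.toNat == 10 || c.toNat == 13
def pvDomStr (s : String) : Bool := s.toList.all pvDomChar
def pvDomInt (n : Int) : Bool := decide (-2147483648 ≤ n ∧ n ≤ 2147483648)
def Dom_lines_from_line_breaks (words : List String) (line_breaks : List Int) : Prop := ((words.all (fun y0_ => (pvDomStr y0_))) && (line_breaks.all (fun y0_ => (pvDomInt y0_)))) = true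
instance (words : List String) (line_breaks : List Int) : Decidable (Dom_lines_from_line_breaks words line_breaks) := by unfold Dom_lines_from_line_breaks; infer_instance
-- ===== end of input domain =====

-- B replaces A's backward slice-and-reverse loop by a hash set of line-start indices
-- (collected in one pointer chase) plus a single forward word-by-word grouping pass
-- with an accumulator — no slicing and no reversal (objective: alternative).


-- ===== PORT A =====
-- A's 'while True' loop; fuel only makes the recursion total (under Pre_ the loop
-- exits via 'last_idx < 1' before the fuel runs out).
def aLoop (words : List String) (idxs : List Int) : Nat → Int → List (List String) → List (List String)
  | 0, _, R => R.reverse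
  | fuel + 1, last_idx, R =>
    if last_idx < 1 then R.reverse
    else
      match PySem.List.pyGet? idxs last_idx with
      | none => R.reverse   -- IndexError in Python; excluded by Pre_
      | some first_idx =>
          aLoop words idxs fuel first_idx
            (R ++ [PySem.List.slice words (some first_idx) (some last_idx)])

def lines_from_line_breaks (words : List String) (line_breaks : List Int) : List (List String) :=
  let idxs := line_breaks.map (fun i => i - 1)
  aLoop words idxs (words.length + 1) (words.length : Int) []

-- ===== PORT B =====
-- Source B's 'while cur >= 1' chase collecting the reached line-start indices into a set;
-- the same fuel guard makes it total.
def bChase (line_breaks : List Int) : Nat → Int → PySem.Set Int → PySem.Set Int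
  | 0, _, s => s
  | fuel + 1, cur, s =>
    if 1 ≤ cur then
      match PySem.List.pyGet? line_breaks cur with
      | none => s          -- IndexError in Python; excluded by Pre_
      | some v => bChase line_breaks fuel (v - 1) (PySem.Set.add s (v - 1))
    else s

def lines_from_line_breaks_alt (words : List String) (line_breaks : List Int) : List (List String) :=
  let starts := bChase line_breaks (words.length + 1) (words.length : Int) PySem.Set.empty
  let st := (PySem.List.enumerate words).foldl
    (fun (st : List (List String) × List String) p =>
      if PySem.Set.contains starts p.1 = true ∧ 0 < p.1 then
        (st.1 ++ [st.2], [p.2])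
      else
        (st.1, st.2 ++ [p.2]))
    ([], [])
  match words with
  | [] => st.1
  | _ :: _ => st.1 ++ [st.2]

-- ===== PRECONDITION & SPEC =====
-- Pre_ restricts to well-formed break tables — the natural domain of the DP's 1-based break
-- pointers: every position 1..len(words) carries an entry with 1 ≤ line_breaks[i] ≤ i.
-- Outside it A raises IndexError or returns a value produced by negative-index wraparound on
-- malformed (< 1) pointers; this also excludes some inputs where a bad entry sits at a
-- position the chase never reaches (reachability is not closed-form), where B agrees with A.
def Pre_lines_from_line_breaks (words : List String) (line_breaks : List Int) : Prop :=
  ∀ i < words.length + 1, 1 ≤ i →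
    (i < line_breaks.length ∧ 1 ≤ line_breaks.getD i 0 ∧ line_breaks.getD i 0 ≤ (i : Int))
instance (words : List String) (line_breaks : List Int) : Decidable (Pre_lines_from_line_breaks words line_breaks) := by unfold Pre_lines_from_line_breaks; infer_instance

def pvWitness_lines_from_line_breaks : List String × List Int := (["a", "b", "c"], [0, 1, 1, 2])

def Spec_lines_from_line_breaks (words : List String) (line_breaks : List Int) (out : List (List String)) : Prop := out = lines_from_line_breaks_alt words line_breaks
instance (words : List String) (line_breaks : List Int) (out : List (List String)) : Decidable (Spec_lines_from_line_breaks words line_breaks out) := by unfold Spec_lines_from_line_breaks; infer_instance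

-- ===== CLAIM (what is proved, stated in full; the proofs are below) =====
def Claim_equal_lines_from_line_breaks : Prop := ∀ (words : List String) (line_breaks : List Int), Dom_lines_from_line_breaks words line_breaks → Pre_lines_from_line_breaks words line_breaks → Spec_lines_from_line_breaks words line_breaks (lines_from_line_breaks words line_breaks)

-- ===== LEMMAS AND PROOFS =====

-- The start indices visited by the chase from `cur` (in chase order, strictly decreasing
-- under Pre_), read directly off line_breaks.
def chain (lb : List Int) : Nat → Int → List Int
  | 0, _ => []
  | fuel + 1, cur =>
    if cur < 1 then []
    else
      match PySem.List.pyGet? lb cur with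
      | none => []
      | some v => (v - 1) :: chain lb fuel (v - 1)


-- The lines A produces, in document order.
def plines (words : List String) (lb : List Int) : Nat → Int → List (List String)
  | 0, _ => []
  | fuel + 1, cur =>
    if cur < 1 then []
    else
      match PySem.List.pyGet? lb cur with
      | none => []
      | some v =>
          plines words lb fuel (v - 1) ++ [PySem.List.slice words (some (v - 1)) (some cur)]

theorem plines_zero (words : List String) (lb : List Int) :
    ∀ fuel, plines words lb fuel 0 = []
  | 0 => rfl
  | fuel + 1 => by simp [plines]

theorem pyGet?_map_sub_one (lb : List Int) (i : Int) :
    PySem.List.pyGet? (lb.map (fun x => x - 1)) i = (PySem.List.pyGet? lb i).map (fun x => x - 1) := by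
  simp [PySem.List.pyGet?, PySem.List.pyIdx?]

theorem aLoop_eq_plines (words : List String) (lb : List Int) :
    ∀ (fuel : Nat) (cur : Int) (R : List (List String)),
      aLoop words (lb.map (fun x => x - 1)) fuel cur R = plines words lb fuel cur ++ R.reverse := by
  intro fuel
  induction fuel with
  | zero => intro cur R; simp [aLoop, plines]
  | succ n ih =>
    intro cur R
    simp only [aLoop, plines, pyGet?_map_sub_one]
    split
    · simp
    · cases h : PySem.List.pyGet? lb cur with
      | none => simp
      | some v => simp [ih]

theorem bChase_mem (lb : List Int) :
    ∀ (fuel : Nat) (cur : Int) (s : PySem.Set Int) (x : Int),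
      (x ∈ bChase lb fuel cur s ↔ x ∈ s ∨ x ∈ chain lb fuel cur) := by
  intro fuel
  induction fuel with
  | zero => intro cur s x; simp [bChase, chain]
  | succ n ih =>
    intro cur s x
    simp only [bChase, chain]
    split
    · cases h : PySem.List.pyGet? lb cur with
      | none => simp [show ¬ cur < 1 by omega]
      | some v =>
          simp [show ¬ cur < 1 by omega, ih, PySem.Set.mem_add]
          tauto
    · simp [show cur < 1 by omega]

-- One grouping step of B's forward pass, for a fixed start set S.
def gStep (S : PySem.Set Int) (st : List (List String) × List String) (p : Int × String) :
    List (List String) × List String :=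
  if PySem.Set.contains S p.1 = true ∧ 0 < p.1 then (st.1 ++ [st.2], [p.2])
  else (st.1, st.2 ++ [p.2])

-- A stretch of indices on which the cut never fires only extends the current line.
theorem gFold_no_cut (S : PySem.Set Int) :
    ∀ (ps : List (Int × String)) (st : List (List String) × List String),
      (∀ p ∈ ps, ¬(PySem.Set.contains S p.1 = true ∧ 0 < p.1)) →
      ps.foldl (gStep S) st = (st.1, st.2 ++ ps.map (·.2)) := by
  intro ps
  induction ps with
  | nil => intro st _; simp
  | cons p ps ih =>
    intro st h
    simp only [List.foldl_cons, List.map_cons]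
    rw [gStep, if_neg (h p (by simp))]
    rw [ih _ (fun q hq => h q (by simp [hq]))]
    simp

-- Main invariant: for any `cur` in the chase orbit, B's forward pass over the first
-- `cur` words, with any start set S that agrees with chain(cur) below cur, reconstructs
-- exactly A's lines plines(cur); simultaneously, chain(cur)'s elements lie in [0, cur).
theorem main_inv (words : List String) (lb : List Int)
    (hpre : Pre_lines_from_line_breaks words lb) :
    ∀ (fuel : Nat) (cur : Int), 0 ≤ cur → cur ≤ (words.length : Int) → cur.toNat < fuel →
      (∀ x ∈ chain lb fuel cur, 0 ≤ x ∧ x < cur) ∧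
      (∀ (S : PySem.Set Int),
        (∀ k : Int, 0 ≤ k → k < cur → ((k ∈ S) ↔ k ∈ chain lb fuel cur)) →
        (1 ≤ cur →
          (((PySem.List.enumerate (words.take cur.toNat)).foldl (gStep S) ([], [])).1 ++
            [((PySem.List.enumerate (words.take cur.toNat)).foldl (gStep S) ([], [])).2]) =
            plines words lb fuel cur) ∧
        (cur < 1 →
          (PySem.List.enumerate (words.take cur.toNat)).foldl (gStep S) ([], []) = ([], []))) := by
  intro fuel
  induction fuel with
  | zero => intro cur _ _ hf; omega
  | succ fuel ih =>
    intro cur h0 hle hf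
    by_cases hcur : cur < 1
    · have hc0 : cur.toNat = 0 := by omega
      refine ⟨by simp [chain, if_pos hcur], fun S _ => ⟨fun h1 => by omega, fun _ => by
        simp [hc0]⟩⟩
    · -- 1 ≤ cur: read the pointer
      have h1c : 1 ≤ cur := by omega
      obtain ⟨hlen, hv1, hv2⟩ := hpre cur.toNat (by omega) (by omega)
      have hget : PySem.List.pyGet? lb cur = some lb[cur.toNat] :=
        PySem.List.pyGet?_eq_some_getElem lb h0 (by omega)
      set v := lb[cur.toNat] with hvdef
      have hgd : lb.getD cur.toNat 0 = v := List.getD_eq_getElem lb 0 hlen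
      rw [hgd] at hv1 hv2
      have hcurcast : ((cur.toNat : Int)) = cur := Int.toNat_of_nonneg h0
      rw [hcurcast] at hv2
      set c := v - 1 with hcdef
      have hc0 : 0 ≤ c := by omega
      have hccur : c < cur := by omega
      have hcn : c ≤ (words.length : Int) := by omega
      have hcf : c.toNat < fuel := by omega
      have hchain : chain lb (fuel + 1) cur = c :: chain lb fuel c := by
        simp only [chain, if_neg hcur, hget]; rw [← hcdef]
      have hplines : plines words lb (fuel + 1) cur =
          plines words lb fuel c ++ [PySem.List.slice words (some c) (some cur)] := by
        simp only [plines, if_neg hcur, hget]; rw [← hcdef]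
      obtain ⟨ihchain, ihfold⟩ := ih c hc0 hcn hcf
      have hmem : ∀ x ∈ chain lb (fuel + 1) cur, 0 ≤ x ∧ x < cur := by
        intro x hx
        rw [hchain] at hx
        rcases List.mem_cons.mp hx with hx | hx
        · omega
        · have := ihchain x hx; omega
      refine ⟨hmem, fun S hS => ⟨fun _ => ?_, fun h => by omega⟩⟩
      -- decompose the first cur words at the cut c
      have hlenw : cur.toNat ≤ words.length := by omega
      set pref := words.take c.toNat with hprefdef
      set mid := (words.take cur.toNat).drop c.toNat with hmiddef
      have hpref' : pref = (words.take cur.toNat).take c.toNat := by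
        rw [hprefdef, List.take_take]
        congr 1
        omega
      have hsplit : words.take cur.toNat = pref ++ mid := by
        rw [hpref', hmiddef, List.take_append_drop]
      have hpreflen : pref.length = c.toNat :=
        List.length_take_of_le (by omega)
      have hmidlen : mid.length = cur.toNat - c.toNat := by
        rw [hmiddef]
        simp [List.length_take_of_le hlenw]
      have hmidne : mid ≠ [] := by
        intro h
        rw [h] at hmidlen
        simp at hmidlen
        omega
      obtain ⟨w, rest, hmid⟩ := List.exists_cons_of_ne_nil hmidne
      have hrestlen : rest.length = cur.toNat - c.toNat - 1 := by
        rw [hmid] at hmidlen; simp at hmidlen; omega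
      -- membership in S below cur is membership in c :: chain fuel c
      have hSc : (c ∈ S) := (hS c hc0 hccur).2 (by rw [hchain]; exact List.mem_cons_self)
      -- the no-cut stretch after the cut
      have hnocut : ∀ p ∈ PySem.List.enumerate rest (c + 1),
          ¬(PySem.Set.contains S p.1 = true ∧ 0 < p.1) := by
        intro p hp hcontra
        rw [PySem.List.mem_enumerate_iff] at hp
        obtain ⟨k, hk, hpeq⟩ := hp
        have hp1 : p.1 = c + 1 + k := by rw [hpeq]
        have hplt : p.1 < cur := by rw [hp1]; omega
        have hpin : p.1 ∈ S := (PySem.Set.contains_iff S p.1).mp hcontra.1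
        have := (hS p.1 (by omega) hplt).1 hpin
        rw [hchain] at this
        rcases List.mem_cons.mp this with h | h
        · omega
        · have := ihchain p.1 h; omega
      -- mid is A's last line
      have hmidslice : mid = PySem.List.slice words (some c) (some cur) := by
        rw [PySem.List.slice_toNat words hc0 (by omega), hmiddef, List.drop_take]
      -- fold over the enumerate of pref ++ mid
      rw [hsplit, PySem.List.enumerate_append, hpreflen]
      have hstart : (0:Int) + (c.toNat : Int) = (c.toNat : Int) := by omega
      rw [hstart, Int.toNat_of_nonneg hc0, List.foldl_append, hmid,
          PySem.List.enumerate_cons, List.foldl_cons,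
          gFold_no_cut S _ _ hnocut, PySem.List.map_snd_enumerate]
      by_cases hc1 : 1 ≤ c
      · have hcontains : PySem.Set.contains S ((c, w).1) = true :=
          (PySem.Set.contains_iff S c).mpr hSc
        have hS' : ∀ k : Int, 0 ≤ k → k < c → ((k ∈ S) ↔ k ∈ chain lb fuel c) := by
          intro k hk0 hkc
          have h2 := hS k hk0 (by omega)
          rw [hchain, List.mem_cons] at h2
          constructor
          · intro h
            rcases h2.mp h with h | h
            · omega
            · exact h
          · intro h
            exact h2.mpr (Or.inr h)
        have hst1 := (ihfold S hS').1 hc1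
        rw [hplines, ← hst1, ← hmidslice, hmid]
        simp only [gStep]
        rw [if_pos ⟨hcontains, by omega⟩]
        simp
      · have hceq : c = 0 := by omega
        have hpref0 : pref = [] := by
          rw [hprefdef, hceq]
          simp
        rw [hplines, ← hmidslice, hmid, hpref0]
        simp only [gStep, PySem.List.enumerate_nil, List.foldl_nil]
        rw [if_neg (by simp; omega)]
        simp [hceq, plines_zero]

theorem lines_from_line_breaks_spec : Claim_equal_lines_from_line_breaks := by
  intro words lb _ hpre
  show lines_from_line_breaks words lb = lines_from_line_breaks_alt words lb
  simp only [lines_from_line_breaks, lines_from_line_breaks_alt]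
  rw [aLoop_eq_plines]
  have hstep : (fun (st : List (List String) × List String) p =>
      if PySem.Set.contains (bChase lb (words.length + 1) (words.length : Int) PySem.Set.empty) p.1 = true ∧ 0 < p.1
      then (st.1 ++ [st.2], [p.2]) else (st.1, st.2 ++ [p.2]))
      = gStep (bChase lb (words.length + 1) (words.length : Int) PySem.Set.empty) := rfl
  rw [hstep]
  cases hw : words with
  | nil => simp [plines]
  | cons w ws =>
    have hlen1 : 1 ≤ (words.length : Int) := by rw [hw]; simp
    obtain ⟨_, hfold⟩ := main_inv words lb hpre (words.length + 1) (words.length : Int)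
      (by omega) (by omega) (by omega)
    have hS : ∀ k : Int, 0 ≤ k → k < (words.length : Int) →
        ((k ∈ bChase lb (words.length + 1) (words.length : Int) PySem.Set.empty) ↔
          k ∈ chain lb (words.length + 1) (words.length : Int)) := by
      intro k _ _
      rw [bChase_mem]
      simp [PySem.Set.empty]
    have hmain := (hfold _ hS).1 hlen1
    rw [Int.toNat_natCast, List.take_length] at hmain
    rw [hw] at hmain
    simpa using hmain.symm
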